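-- pv_equiv track=rewrite | github.com/goodnightzsj/pt-invite-watcher | pt_invite_watcher/config.py | _clean_base_url
-- ===== SOURCE A (Python) =====
-- def _clean_base_url(base_url: str) -> str:
--     base_url = (base_url or "").strip()
--     if not base_url:
--         return ""
--     # Users often paste Swagger docs url like ".../docs" or an api prefix like ".../api/v1".
--     # Keep any reverse-proxy prefix path, only strip these well-known suffixes.
--     while True:
--         original = base_url
--         for suffix in ("/docs", "/docs/", "/api/v1", "/api/v1/"):
--             if base_url.endswith(suffix):
--                 base_url = base_url[: -len(suffix)]
--                 break
--         if base_url == original: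
--             break
--     return base_url.rstrip("/")
-- ===== SOURCE B (Python) =====
-- import re
--
-- # One anchored regex pass removes the same contiguous trailing run of known
-- # suffix tokens that A's while/for loop peels one token at a time.
-- _SUFFIX_RE = re.compile(r'(?:/docs/?|/api/v1/?)+$')
--
--
-- def _clean_base_url(base_url: str) -> str:
--     base_url = (base_url or "").strip()
--     if not base_url:
--         return ""
--     return _SUFFIX_RE.sub("", base_url).rstrip("/")
-- ===== Notes on version B (the rewrite author's own statement) =====
-- stated objective: idiomatic
-- what changed: The iterative while/for suffix-peeling loop is replaced by a single precompiled anchored-regex substitution (pattern (?:/docs/?|/api/v1/?)+$) that deletes the whole trailing run of known tokens in one match, followed by the same rstrip.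
import Mathlib
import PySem

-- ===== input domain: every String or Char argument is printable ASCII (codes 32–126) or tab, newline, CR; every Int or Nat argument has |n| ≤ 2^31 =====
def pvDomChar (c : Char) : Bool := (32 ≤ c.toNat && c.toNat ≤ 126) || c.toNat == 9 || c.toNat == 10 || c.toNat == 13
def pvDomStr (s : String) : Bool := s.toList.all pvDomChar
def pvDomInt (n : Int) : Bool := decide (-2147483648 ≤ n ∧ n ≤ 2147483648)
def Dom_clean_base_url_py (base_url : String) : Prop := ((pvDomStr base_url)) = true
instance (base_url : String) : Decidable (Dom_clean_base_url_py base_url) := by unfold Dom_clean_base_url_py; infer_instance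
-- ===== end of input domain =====

-- B replaces A's iterative while/for suffix-peeling loop with a single anchored-regex
-- substitution (re.sub) that removes the whole trailing run of known tokens at once (idiomatic).

-- ===== PORT A =====
-- Python's  s.rstrip("/")  (used by both A and B; PySem has only the two-sided stripChars):
-- exact — drops exactly the trailing run of '/' characters.
def pvRstripSlash (cs : List Char) : List Char :=
  (cs.reverse.dropWhile (fun c => c == '/')).reverse

-- one pass of A's inner `for suffix in ("/docs", "/docs/", "/api/v1", "/api/v1/")`:
-- the first suffix that matches is stripped (base_url[:-len(suffix)]) and the for-loop breaks.
def pvStepA (cs : List Char) : List Char :=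
  if PySem.Chars.endswith cs ['/', 'd', 'o', 'c', 's'] then PySem.Chars.slice cs none (some (-5))
  else if PySem.Chars.endswith cs ['/', 'd', 'o', 'c', 's', '/'] then PySem.Chars.slice cs none (some (-6))
  else if PySem.Chars.endswith cs ['/', 'a', 'p', 'i', '/', 'v', '1'] then PySem.Chars.slice cs none (some (-7))
  else if PySem.Chars.endswith cs ['/', 'a', 'p', 'i', '/', 'v', '1', '/'] then PySem.Chars.slice cs none (some (-8))
  else cs

-- A's `while True` loop: repeat pvStepA until nothing changes.  Each changing step strips a
-- nonempty suffix, so cs.length bounds the number of iterations (structural fuel; the fuel-0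
-- branch is unreachable, proved below in pvPeelAFuel_irrel).
def pvPeelAFuel : Nat → List Char → List Char
  | 0, cs => cs
  | fuel + 1, cs => if pvStepA cs = cs then cs else pvPeelAFuel fuel (pvStepA cs)

def pvPeelA (cs : List Char) : List Char := pvPeelAFuel cs.length cs

-- `(base_url or "")` equals base_url for a str argument unless base_url = "", where both
-- sides strip to the empty string — so the port strips directly.
def clean_base_url_py (base_url : String) : String :=
  if PySem.Chars.strip base_url.toList = [] then ""
  else String.ofList (pvRstripSlash (pvPeelA (PySem.Chars.strip base_url.toList)))

-- ===== PORT B =====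
-- hand port (exact) of matching B's pattern body `(?:/docs/?|/api/v1/?)+$` at one position:
-- the regex engine backtracks over the alternation, so the pattern matches the whole suffix
-- iff it is a concatenation of one-or-more tokens — exactly this recursion (each step consumes
-- at least one token character, so cs.length is structural fuel; the fuel-0 nonempty branch is
-- unreachable, proved below in pvDecompFuel_irrel).
def pvDecompFuel : Nat → List Char → Bool
  | _, [] => true
  | 0, _ :: _ => false
  | fuel + 1, c :: rest =>
      (PySem.Chars.startswith (c :: rest) ['/', 'd', 'o', 'c', 's', '/'] && pvDecompFuel fuel (rest.drop 5)) ||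
      (PySem.Chars.startswith (c :: rest) ['/', 'd', 'o', 'c', 's'] && pvDecompFuel fuel (rest.drop 4)) ||
      (PySem.Chars.startswith (c :: rest) ['/', 'a', 'p', 'i', '/', 'v', '1', '/'] && pvDecompFuel fuel (rest.drop 7)) ||
      (PySem.Chars.startswith (c :: rest) ['/', 'a', 'p', 'i', '/', 'v', '1'] && pvDecompFuel fuel (rest.drop 6))

def pvDecomp (cs : List Char) : Bool := pvDecompFuel cs.length cs

-- hand port (exact) of `_SUFFIX_RE.sub("", cs)`: re.sub removes the leftmost match of the
-- $-anchored pattern, i.e. scans start positions i upward and cuts at the first i whose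
-- remaining (nonempty, since i < len) suffix the pattern matches.
def pvSubAnchored (cs : List Char) : List Char :=
  match (List.range cs.length).find? (fun i => pvDecomp (cs.drop i)) with
  | some i => cs.take i
  | none => cs

def clean_base_url_py_alt (base_url : String) : String :=
  if PySem.Chars.strip base_url.toList = [] then ""
  else String.ofList (pvRstripSlash (pvSubAnchored (PySem.Chars.strip base_url.toList)))

-- ===== PRECONDITION & SPEC =====
def Spec_clean_base_url_py (base_url : String) (out : String) : Prop := out = clean_base_url_py_alt base_url
instance (base_url : String) (out : String) : Decidable (Spec_clean_base_url_py base_url out) := by unfold Spec_clean_base_url_py; infer_instance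

-- ===== CLAIM (what is proved, stated in full; the proofs are below) =====
def Claim_equal_clean_base_url_py : Prop := ∀ (base_url : String), Dom_clean_base_url_py base_url → Spec_clean_base_url_py base_url (clean_base_url_py base_url)

-- ===== LEMMAS AND PROOFS =====

lemma pvSliceTok (p t : List Char) (n : Int) (hk : n = -(t.length : Int)) (ht : t ≠ []) :
    PySem.Chars.slice (p ++ t) none (some n) = p := by
  subst hk
  have h0 : 0 < t.length := List.length_pos_of_ne_nil ht
  simp only [PySem.Chars.slice_eq_listSlice, PySem.List.slice, PySem.List.clampIdx]
  have h2 : (((p ++ t).length : Int) + -(t.length : Int)).toNat = p.length := by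
    simp [List.length_append]
  split_ifs with ha hb <;> simp_all
  exact absurd hb (by omega)

lemma pvStepA_length_lt (cs : List Char) (h : pvStepA cs ≠ cs) :
    (pvStepA cs).length < cs.length := by
  unfold pvStepA at h ⊢
  split_ifs at h ⊢ with h1 h2 h3 h4
  · obtain ⟨p, hp⟩ := (PySem.Chars.endswith_iff _ _).mp h1
    rw [← hp, pvSliceTok _ _ _ (by decide) (by decide)]
    simp
  · obtain ⟨p, hp⟩ := (PySem.Chars.endswith_iff _ _).mp h2
    rw [← hp, pvSliceTok _ _ _ (by decide) (by decide)]
    simp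
  · obtain ⟨p, hp⟩ := (PySem.Chars.endswith_iff _ _).mp h3
    rw [← hp, pvSliceTok _ _ _ (by decide) (by decide)]
    simp
  · obtain ⟨p, hp⟩ := (PySem.Chars.endswith_iff _ _).mp h4
    rw [← hp, pvSliceTok _ _ _ (by decide) (by decide)]
    simp
  · exact absurd rfl h

-- the fuel-0 branch of pvPeelAFuel is unreachable: any fuel ≥ cs.length gives the same value
lemma pvPeelAFuel_irrel : ∀ (n : Nat) (cs : List Char), cs.length = n →
    ∀ (f g : Nat), n ≤ f → n ≤ g → pvPeelAFuel f cs = pvPeelAFuel g cs := by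
  intro n
  induction n using Nat.strong_induction_on with
  | _ n IH =>
    intro cs hn f g hf hg
    match f, g with
    | 0, 0 => rfl
    | 0, g + 1 =>
        have : cs = [] := List.length_eq_zero_iff.mp (by omega)
        subst this; simp [pvPeelAFuel, show pvStepA [] = [] from by decide]
    | f + 1, 0 =>
        have : cs = [] := List.length_eq_zero_iff.mp (by omega)
        subst this; simp [pvPeelAFuel, show pvStepA [] = [] from by decide]
    | f + 1, g + 1 =>
        rw [pvPeelAFuel, pvPeelAFuel]
        by_cases h : pvStepA cs = cs
        · rw [if_pos h, if_pos h]
        · rw [if_neg h, if_neg h]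
          have hlt := pvStepA_length_lt cs h
          exact IH (pvStepA cs).length (by omega) _ rfl f g (by omega) (by omega)

-- unfolding equation for pvPeelA (A's loop, one iteration)
lemma pvPeelA_eq (cs : List Char) :
    pvPeelA cs = if pvStepA cs = cs then cs else pvPeelA (pvStepA cs) := by
  by_cases h : pvStepA cs = cs
  · rw [if_pos h]
    unfold pvPeelA
    match cs with
    | [] => rfl
    | c :: rest => rw [show (c :: rest).length = rest.length + 1 from rfl, pvPeelAFuel, if_pos h]
  · rw [if_neg h]
    match cs with
    | [] => exact absurd (by decide) h
    | c :: rest =>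
        unfold pvPeelA
        rw [show (c :: rest).length = rest.length + 1 from rfl, pvPeelAFuel, if_neg h]
        have hlt := pvStepA_length_lt _ h
        exact pvPeelAFuel_irrel _ _ rfl _ _ (by simp at hlt ⊢; omega) le_rfl

-- fuel irrelevance for pvDecompFuel (each step consumes ≥ 5 characters but only 1 fuel)
lemma pvDecompFuel_irrel : ∀ (n : Nat) (cs : List Char), cs.length = n →
    ∀ (f g : Nat), n ≤ f → n ≤ g → pvDecompFuel f cs = pvDecompFuel g cs := by
  intro n
  induction n using Nat.strong_induction_on with
  | _ n IH =>
    intro cs hn f g hf hg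
    match cs with
    | [] => cases f <;> cases g <;> rfl
    | c :: rest =>
      have hr : rest.length + 1 = n := by simpa using hn
      match f, g with
      | 0, _ => exact absurd hf (by omega)
      | _ + 1, 0 => exact absurd hg (by omega)
      | f + 1, g + 1 =>
        rw [pvDecompFuel, pvDecompFuel]
        have e5 : pvDecompFuel f (rest.drop 5) = pvDecompFuel g (rest.drop 5) :=
          IH _ (by simp only [List.length_drop]; omega) _ rfl f g (by simp only [List.length_drop]; omega)
            (by simp only [List.length_drop]; omega)
        have e4 : pvDecompFuel f (rest.drop 4) = pvDecompFuel g (rest.drop 4) :=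
          IH _ (by simp only [List.length_drop]; omega) _ rfl f g (by simp only [List.length_drop]; omega)
            (by simp only [List.length_drop]; omega)
        have e7 : pvDecompFuel f (rest.drop 7) = pvDecompFuel g (rest.drop 7) :=
          IH _ (by simp only [List.length_drop]; omega) _ rfl f g (by simp only [List.length_drop]; omega)
            (by simp only [List.length_drop]; omega)
        have e6 : pvDecompFuel f (rest.drop 6) = pvDecompFuel g (rest.drop 6) :=
          IH _ (by simp only [List.length_drop]; omega) _ rfl f g (by simp only [List.length_drop]; omega)
            (by simp only [List.length_drop]; omega)
        rw [e5, e4, e7, e6]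

-- unfolding equation for pvDecomp on a nonempty list
lemma pvDecomp_cons (c : Char) (rest : List Char) :
    pvDecomp (c :: rest) =
      ((PySem.Chars.startswith (c :: rest) ['/', 'd', 'o', 'c', 's', '/'] && pvDecomp (rest.drop 5)) ||
       (PySem.Chars.startswith (c :: rest) ['/', 'd', 'o', 'c', 's'] && pvDecomp (rest.drop 4)) ||
       (PySem.Chars.startswith (c :: rest) ['/', 'a', 'p', 'i', '/', 'v', '1', '/'] && pvDecomp (rest.drop 7)) ||
       (PySem.Chars.startswith (c :: rest) ['/', 'a', 'p', 'i', '/', 'v', '1'] && pvDecomp (rest.drop 6))) := by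
  unfold pvDecomp
  rw [show (c :: rest).length = rest.length + 1 from rfl, pvDecompFuel]
  have e5 := pvDecompFuel_irrel _ (rest.drop 5) rfl rest.length (rest.drop 5).length
    (by simp only [List.length_drop]; omega) le_rfl
  have e4 := pvDecompFuel_irrel _ (rest.drop 4) rfl rest.length (rest.drop 4).length
    (by simp only [List.length_drop]; omega) le_rfl
  have e7 := pvDecompFuel_irrel _ (rest.drop 7) rfl rest.length (rest.drop 7).length
    (by simp only [List.length_drop]; omega) le_rfl
  have e6 := pvDecompFuel_irrel _ (rest.drop 6) rfl rest.length (rest.drop 6).length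
    (by simp only [List.length_drop]; omega) le_rfl
  rw [e5, e4, e7, e6]

-- no token is a suffix of (anything ++ a different, longer token): needed to read off pvStepA
lemma pvNoSuf₁ (p : List Char) : ¬ (['/', 'd', 'o', 'c', 's'] <:+ p ++ ['/', 'd', 'o', 'c', 's', '/']) := by
  intro h; rw [← List.reverse_prefix] at h; simp [List.cons_prefix_cons] at h
lemma pvNoSuf₂ (p : List Char) : ¬ (['/', 'd', 'o', 'c', 's'] <:+ p ++ ['/', 'a', 'p', 'i', '/', 'v', '1']) := by
  intro h; rw [← List.reverse_prefix] at h; simp [List.cons_prefix_cons] at h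
lemma pvNoSuf₃ (p : List Char) : ¬ (['/', 'd', 'o', 'c', 's', '/'] <:+ p ++ ['/', 'a', 'p', 'i', '/', 'v', '1']) := by
  intro h; rw [← List.reverse_prefix] at h; simp [List.cons_prefix_cons] at h
lemma pvNoSuf₄ (p : List Char) : ¬ (['/', 'd', 'o', 'c', 's'] <:+ p ++ ['/', 'a', 'p', 'i', '/', 'v', '1', '/']) := by
  intro h; rw [← List.reverse_prefix] at h; simp [List.cons_prefix_cons] at h
lemma pvNoSuf₅ (p : List Char) : ¬ (['/', 'd', 'o', 'c', 's', '/'] <:+ p ++ ['/', 'a', 'p', 'i', '/', 'v', '1', '/']) := by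
  intro h; rw [← List.reverse_prefix] at h; simp [List.cons_prefix_cons] at h
lemma pvNoSuf₆ (p : List Char) : ¬ (['/', 'a', 'p', 'i', '/', 'v', '1'] <:+ p ++ ['/', 'a', 'p', 'i', '/', 'v', '1', '/']) := by
  intro h; rw [← List.reverse_prefix] at h; simp [List.cons_prefix_cons] at h

-- pvStepA on a string ending in exactly one token strips exactly that token
lemma pvStep_tok₁ (p : List Char) : pvStepA (p ++ ['/', 'd', 'o', 'c', 's']) = p := by
  unfold pvStepA
  rw [if_pos (by rw [PySem.Chars.endswith_iff]; exact List.suffix_append _ _)]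
  exact pvSliceTok _ _ _ (by decide) (by decide)
lemma pvStep_tok₂ (p : List Char) : pvStepA (p ++ ['/', 'd', 'o', 'c', 's', '/']) = p := by
  unfold pvStepA
  rw [if_neg (by rw [PySem.Chars.endswith_iff]; exact pvNoSuf₁ p),
      if_pos (by rw [PySem.Chars.endswith_iff]; exact List.suffix_append _ _)]
  exact pvSliceTok _ _ _ (by decide) (by decide)
lemma pvStep_tok₃ (p : List Char) : pvStepA (p ++ ['/', 'a', 'p', 'i', '/', 'v', '1']) = p := by
  unfold pvStepA
  rw [if_neg (by rw [PySem.Chars.endswith_iff]; exact pvNoSuf₂ p),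
      if_neg (by rw [PySem.Chars.endswith_iff]; exact pvNoSuf₃ p),
      if_pos (by rw [PySem.Chars.endswith_iff]; exact List.suffix_append _ _)]
  exact pvSliceTok _ _ _ (by decide) (by decide)
lemma pvStep_tok₄ (p : List Char) : pvStepA (p ++ ['/', 'a', 'p', 'i', '/', 'v', '1', '/']) = p := by
  unfold pvStepA
  rw [if_neg (by rw [PySem.Chars.endswith_iff]; exact pvNoSuf₄ p),
      if_neg (by rw [PySem.Chars.endswith_iff]; exact pvNoSuf₅ p),
      if_neg (by rw [PySem.Chars.endswith_iff]; exact pvNoSuf₆ p),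
      if_pos (by rw [PySem.Chars.endswith_iff]; exact List.suffix_append _ _)]
  exact pvSliceTok _ _ _ (by decide) (by decide)

-- a changed pvStepA means: cs ends in a token, and pvStepA stripped exactly it
lemma pvStepA_cases (cs : List Char) (h : pvStepA cs ≠ cs) :
    ∃ t, pvDecomp t = true ∧ t ≠ [] ∧ cs = pvStepA cs ++ t := by
  by_cases h1 : PySem.Chars.endswith cs ['/', 'd', 'o', 'c', 's']
  · obtain ⟨p, hp⟩ := (PySem.Chars.endswith_iff _ _).mp h1
    exact ⟨['/', 'd', 'o', 'c', 's'], by decide, by decide, by rw [← hp, pvStep_tok₁]⟩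
  by_cases h2 : PySem.Chars.endswith cs ['/', 'd', 'o', 'c', 's', '/']
  · obtain ⟨p, hp⟩ := (PySem.Chars.endswith_iff _ _).mp h2
    exact ⟨['/', 'd', 'o', 'c', 's', '/'], by decide, by decide, by rw [← hp, pvStep_tok₂]⟩
  by_cases h3 : PySem.Chars.endswith cs ['/', 'a', 'p', 'i', '/', 'v', '1']
  · obtain ⟨p, hp⟩ := (PySem.Chars.endswith_iff _ _).mp h3
    exact ⟨['/', 'a', 'p', 'i', '/', 'v', '1'], by decide, by decide, by rw [← hp, pvStep_tok₃]⟩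
  by_cases h4 : PySem.Chars.endswith cs ['/', 'a', 'p', 'i', '/', 'v', '1', '/']
  · obtain ⟨p, hp⟩ := (PySem.Chars.endswith_iff _ _).mp h4
    exact ⟨['/', 'a', 'p', 'i', '/', 'v', '1', '/'], by decide, by decide, by rw [← hp, pvStep_tok₄]⟩
  · refine absurd ?_ h
    unfold pvStepA
    rw [if_neg h1, if_neg h2, if_neg h3, if_neg h4]

-- pvDecomp is closed under prepending a token …
lemma pvDecomp_cons₁ (x : List Char) (hx : pvDecomp x = true) :
    pvDecomp (['/', 'd', 'o', 'c', 's'] ++ x) = true := by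
  have h1 : PySem.Chars.startswith ('/'::'d'::'o'::'c'::'s'::x) ['/', 'd', 'o', 'c', 's'] = true := by
    rw [PySem.Chars.startswith_iff]; exact ⟨x, rfl⟩
  rw [show ['/', 'd', 'o', 'c', 's'] ++ x = '/'::'d'::'o'::'c'::'s'::x from rfl, pvDecomp_cons]
  simp [h1, hx]
lemma pvDecomp_cons₂ (x : List Char) (hx : pvDecomp x = true) :
    pvDecomp (['/', 'd', 'o', 'c', 's', '/'] ++ x) = true := by
  have h1 : PySem.Chars.startswith ('/'::'d'::'o'::'c'::'s'::'/'::x) ['/', 'd', 'o', 'c', 's', '/'] = true := by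
    rw [PySem.Chars.startswith_iff]; exact ⟨x, rfl⟩
  rw [show ['/', 'd', 'o', 'c', 's', '/'] ++ x = '/'::'d'::'o'::'c'::'s'::'/'::x from rfl, pvDecomp_cons]
  simp [h1, hx]
lemma pvDecomp_cons₃ (x : List Char) (hx : pvDecomp x = true) :
    pvDecomp (['/', 'a', 'p', 'i', '/', 'v', '1'] ++ x) = true := by
  have h1 : PySem.Chars.startswith ('/'::'a'::'p'::'i'::'/'::'v'::'1'::x) ['/', 'a', 'p', 'i', '/', 'v', '1'] = true := by
    rw [PySem.Chars.startswith_iff]; exact ⟨x, rfl⟩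
  rw [show ['/', 'a', 'p', 'i', '/', 'v', '1'] ++ x = '/'::'a'::'p'::'i'::'/'::'v'::'1'::x from rfl, pvDecomp_cons]
  simp [h1, hx]
lemma pvDecomp_cons₄ (x : List Char) (hx : pvDecomp x = true) :
    pvDecomp (['/', 'a', 'p', 'i', '/', 'v', '1', '/'] ++ x) = true := by
  have h1 : PySem.Chars.startswith ('/'::'a'::'p'::'i'::'/'::'v'::'1'::'/'::x) ['/', 'a', 'p', 'i', '/', 'v', '1', '/'] = true := by
    rw [PySem.Chars.startswith_iff]; exact ⟨x, rfl⟩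
  rw [show ['/', 'a', 'p', 'i', '/', 'v', '1', '/'] ++ x = '/'::'a'::'p'::'i'::'/'::'v'::'1'::'/'::x from rfl, pvDecomp_cons]
  simp [h1, hx]

-- … and hence under concatenation
lemma pvDecomp_append : ∀ (n : Nat) (a b : List Char), a.length = n →
    pvDecomp a = true → pvDecomp b = true → pvDecomp (a ++ b) = true := by
  intro n
  induction n using Nat.strong_induction_on with
  | _ n IH =>
    intro a b hn ha hb
    match a with
    | [] => simpa using hb
    | c :: rest =>
      simp at hn
      rw [pvDecomp_cons] at ha
      simp only [Bool.or_eq_true, Bool.and_eq_true] at ha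
      rcases ha with ((⟨hs, hd⟩ | ⟨hs, hd⟩) | ⟨hs, hd⟩) | ⟨hs, hd⟩
      · obtain ⟨r, hr⟩ := (PySem.Chars.startswith_iff _ _).mp hs
        have hr' := congrArg (List.drop 6) hr
        have hlen := congrArg List.length hr
        simp at hr' hlen
        have hrb : pvDecomp (r ++ b) = true :=
          IH r.length (by omega) r b rfl (by rw [hr']; exact hd) hb
        rw [show (c :: rest) ++ b = ['/', 'd', 'o', 'c', 's', '/'] ++ (r ++ b) from by
              rw [← List.append_assoc, hr]]
        exact pvDecomp_cons₂ _ hrb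
      · obtain ⟨r, hr⟩ := (PySem.Chars.startswith_iff _ _).mp hs
        have hr' := congrArg (List.drop 5) hr
        have hlen := congrArg List.length hr
        simp at hr' hlen
        have hrb : pvDecomp (r ++ b) = true :=
          IH r.length (by omega) r b rfl (by rw [hr']; exact hd) hb
        rw [show (c :: rest) ++ b = ['/', 'd', 'o', 'c', 's'] ++ (r ++ b) from by
              rw [← List.append_assoc, hr]]
        exact pvDecomp_cons₁ _ hrb
      · obtain ⟨r, hr⟩ := (PySem.Chars.startswith_iff _ _).mp hs
        have hr' := congrArg (List.drop 8) hr
        have hlen := congrArg List.length hr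
        simp at hr' hlen
        have hrb : pvDecomp (r ++ b) = true :=
          IH r.length (by omega) r b rfl (by rw [hr']; exact hd) hb
        rw [show (c :: rest) ++ b = ['/', 'a', 'p', 'i', '/', 'v', '1', '/'] ++ (r ++ b) from by
              rw [← List.append_assoc, hr]]
        exact pvDecomp_cons₄ _ hrb
      · obtain ⟨r, hr⟩ := (PySem.Chars.startswith_iff _ _).mp hs
        have hr' := congrArg (List.drop 7) hr
        have hlen := congrArg List.length hr
        simp at hr' hlen
        have hrb : pvDecomp (r ++ b) = true :=
          IH r.length (by omega) r b rfl (by rw [hr']; exact hd) hb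
        rw [show (c :: rest) ++ b = ['/', 'a', 'p', 'i', '/', 'v', '1'] ++ (r ++ b) from by
              rw [← List.append_assoc, hr]]
        exact pvDecomp_cons₃ _ hrb

-- peeling a whole trailing token leaves pvPeelA unchanged
lemma pvPeelA_append (p t : List Char) (hstep : pvStepA (p ++ t) = p) (htne : t ≠ []) :
    pvPeelA (p ++ t) = pvPeelA p := by
  have hne : ¬ (pvStepA (p ++ t) = p ++ t) := by
    rw [hstep]
    intro hc
    exact htne (List.self_eq_append_right.mp hc)
  rw [pvPeelA_eq, if_neg hne, hstep]

-- pvPeelA ignores any trailing token-decomposable block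
lemma pvPeelA_append_decomp : ∀ (n : Nat) (u p : List Char), u.length = n →
    pvDecomp u = true → pvPeelA (p ++ u) = pvPeelA p := by
  intro n
  induction n using Nat.strong_induction_on with
  | _ n IH =>
    intro u p hn hu
    match u with
    | [] => simp
    | c :: rest =>
      simp at hn
      rw [pvDecomp_cons] at hu
      simp only [Bool.or_eq_true, Bool.and_eq_true] at hu
      rcases hu with ((⟨hs, hd⟩ | ⟨hs, hd⟩) | ⟨hs, hd⟩) | ⟨hs, hd⟩
      · obtain ⟨r, hr⟩ := (PySem.Chars.startswith_iff _ _).mp hs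
        have hr' := congrArg (List.drop 6) hr
        have hlen := congrArg List.length hr
        simp at hr' hlen
        rw [show p ++ (c :: rest) = (p ++ ['/', 'd', 'o', 'c', 's', '/']) ++ r from by
              rw [List.append_assoc, hr]]
        rw [IH r.length (by omega) r _ rfl (by rw [hr']; exact hd)]
        exact pvPeelA_append _ _ (pvStep_tok₂ p) (by decide)
      · obtain ⟨r, hr⟩ := (PySem.Chars.startswith_iff _ _).mp hs
        have hr' := congrArg (List.drop 5) hr
        have hlen := congrArg List.length hr
        simp at hr' hlen
        rw [show p ++ (c :: rest) = (p ++ ['/', 'd', 'o', 'c', 's']) ++ r from by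
              rw [List.append_assoc, hr]]
        rw [IH r.length (by omega) r _ rfl (by rw [hr']; exact hd)]
        exact pvPeelA_append _ _ (pvStep_tok₁ p) (by decide)
      · obtain ⟨r, hr⟩ := (PySem.Chars.startswith_iff _ _).mp hs
        have hr' := congrArg (List.drop 8) hr
        have hlen := congrArg List.length hr
        simp at hr' hlen
        rw [show p ++ (c :: rest) = (p ++ ['/', 'a', 'p', 'i', '/', 'v', '1', '/']) ++ r from by
              rw [List.append_assoc, hr]]
        rw [IH r.length (by omega) r _ rfl (by rw [hr']; exact hd)]
        exact pvPeelA_append _ _ (pvStep_tok₄ p) (by decide)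
      · obtain ⟨r, hr⟩ := (PySem.Chars.startswith_iff _ _).mp hs
        have hr' := congrArg (List.drop 7) hr
        have hlen := congrArg List.length hr
        simp at hr' hlen
        rw [show p ++ (c :: rest) = (p ++ ['/', 'a', 'p', 'i', '/', 'v', '1']) ++ r from by
              rw [List.append_assoc, hr]]
        rw [IH r.length (by omega) r _ rfl (by rw [hr']; exact hd)]
        exact pvPeelA_append _ _ (pvStep_tok₃ p) (by decide)

-- what A's loop leaves behind: cs = (result) ++ (a token-decomposable block)
lemma pvPeelA_sound : ∀ (n : Nat) (cs : List Char), cs.length = n →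
    ∃ u, pvDecomp u = true ∧ cs = pvPeelA cs ++ u := by
  intro n
  induction n using Nat.strong_induction_on with
  | _ n IH =>
    intro cs hn
    by_cases h : pvStepA cs = cs
    · exact ⟨[], by decide, by rw [pvPeelA_eq, if_pos h]; simp⟩
    · obtain ⟨t, htd, htne, hcs⟩ := pvStepA_cases cs h
      have hlt := pvStepA_length_lt cs h
      obtain ⟨u', hu', hstep⟩ := IH (pvStepA cs).length (by omega) (pvStepA cs) rfl
      refine ⟨u' ++ t, pvDecomp_append u'.length _ _ rfl hu' htd, ?_⟩
      rw [pvPeelA_eq, if_neg h, ← List.append_assoc, ← hstep, ← hcs]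

lemma pvPeelA_length_le (cs : List Char) : (pvPeelA cs).length ≤ cs.length := by
  obtain ⟨u, _, hcs⟩ := pvPeelA_sound cs.length cs rfl
  have := congrArg List.length hcs
  simp at this
  omega

-- find? over range finds the least index satisfying the predicate
lemma pvFindRange (p : Nat → Bool) : ∀ (n i : Nat), i < n → p i = true →
    (∀ j, j < i → p j = false) → (List.range n).find? p = some i := by
  intro n
  induction n with
  | zero => intro i hi _ _; exact absurd hi (by omega)
  | succ m IH =>
    intro i hi hp hmin
    rw [List.range_succ, List.find?_append]
    by_cases h : i < m
    · rw [IH i h hp hmin]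
      rfl
    · have hin : i = m := by omega
      subst hin
      have hnone : (List.range i).find? p = none := by
        rw [List.find?_eq_none]
        intro j hj
        simp [hmin j (List.mem_range.mp hj)]
      rw [hnone]
      simp [hp]

-- MAIN: A's iterated peel equals B's leftmost-anchored-match cut
lemma pvPeel_eq_sub (cs : List Char) : pvSubAnchored cs = pvPeelA cs := by
  obtain ⟨u, hu, hcs⟩ := pvPeelA_sound cs.length cs rfl
  have hmin : ∀ j, j < (pvPeelA cs).length → pvDecomp (cs.drop j) = false := by
    intro j hj
    by_contra hcon
    have hdj : pvDecomp (cs.drop j) = true := by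
      cases hb : pvDecomp (cs.drop j) with
      | false => exact absurd hb hcon
      | true => rfl
    have heq : pvPeelA cs = pvPeelA (cs.take j) := by
      conv_lhs => rw [show cs = cs.take j ++ cs.drop j from (List.take_append_drop j cs).symm]
      exact pvPeelA_append_decomp (cs.drop j).length _ _ rfl hdj
    have hle := pvPeelA_length_le (cs.take j)
    rw [← heq] at hle
    simp [List.length_take] at hle
    omega
  unfold pvSubAnchored
  by_cases hu0 : u = []
  · subst hu0
    have hcs' : pvPeelA cs = cs := by simpa using hcs.symm
    have hnone : (List.range cs.length).find? (fun i => pvDecomp (cs.drop i)) = none := by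
      rw [List.find?_eq_none]
      intro j hj
      have hjl : j < cs.length := List.mem_range.mp hj
      simp [hmin j (by rw [hcs']; exact hjl)]
    rw [hnone]
    exact hcs'.symm
  · have hul : 0 < u.length := List.length_pos_of_ne_nil hu0
    have hlen := congrArg List.length hcs
    simp at hlen
    set r := pvPeelA cs with hrdef
    have hdrop : cs.drop r.length = u := by
      rw [hcs]
      exact List.drop_left
    rw [pvFindRange _ cs.length r.length (by omega)
          (by rw [hdrop]; exact hu) hmin]
    show List.take r.length cs = r
    rw [hcs]
    exact List.take_left

-- ===== VERDICT (by name: the statement is the Claim_ definition above) =====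
theorem clean_base_url_py_spec : Claim_equal_clean_base_url_py := by
  intro base_url _
  unfold Spec_clean_base_url_py clean_base_url_py clean_base_url_py_alt
  rw [pvPeel_eq_sub]
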